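-- pv_equiv track=rewrite | github.com/PraMamba/cell-o1 | eval/cell_type/simplified_confusion_matrix.py | filter_low_frequency_predictions
-- ===== SOURCE A (Python) =====
-- from typing import Dict, List, Tuple, Set
-- from collections import Counter
--
-- def is_format_error(prediction: str) -> bool:
--     """
--     Check if a prediction contains format errors.
--
--     Args:
--         prediction: Cell type prediction string
--
--     Returns:
--         True if contains format errors
--     """
--     error_patterns = [
--         '</think>',
--         '<think>',
--         '</answer>',
--         '<answer>',
--         'Final answer:',
--         'Cell 1',
--         'Cell 2',
--         'Cell 3',
--         'Cell 4',
--         'Cell 5'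
--     ]
--
--     for pattern in error_patterns:
--         if pattern in prediction:
--             return True
--
--     return False
--
-- def filter_low_frequency_predictions(
--     y_true: List[str],
--     y_pred: List[str],
--     threshold: int = 5,
--     dataset: str = "A013"
-- ) -> Tuple[List[str], List[str], Dict]:
--     """
--     Filter out low-frequency predictions and group them as 'Other'.
--
--     Args:
--         y_true: Ground truth labels
--         y_pred: Predicted labels
--         threshold: Minimum frequency to keep a prediction
--         dataset: Dataset identifier
--
--     Returns:
--         Tuple of (filtered_y_true, filtered_y_pred, stats)
--     """
--     # Count prediction frequencies
--     pred_counter = Counter(y_pred)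
--
--     # Separate format errors
--     format_errors = []
--     valid_preds = []
--     for pred in y_pred:
--         if is_format_error(pred):
--             format_errors.append(pred)
--         else:
--             valid_preds.append(pred)
--
--     # Get frequent predictions
--     frequent_preds = {pred for pred, count in pred_counter.items()
--                      if count >= threshold and not is_format_error(pred)}
--
--     # Always include all ground truth classes
--     gt_classes = set(y_true)
--     keep_classes = frequent_preds | gt_classes
--
--     # Filter predictions
--     filtered_y_pred = []
--     for pred in y_pred:
--         if is_format_error(pred):
--             filtered_y_pred.append("[Format Error]")
--         elif pred in keep_classes:
--             filtered_y_pred.append(pred)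
--         else:
--             filtered_y_pred.append("[Other Predictions]")
--
--     stats = {
--         "total_unique_predictions": len(pred_counter),
--         "kept_predictions": len(keep_classes),
--         "format_errors_count": len(format_errors),
--         "other_predictions_count": sum(1 for p in filtered_y_pred if p == "[Other Predictions]"),
--         "threshold": threshold
--     }
--
--     return y_true, filtered_y_pred, stats
-- ===== SOURCE B (Python) =====
-- from collections import Counter
--
-- def is_format_error(prediction: str) -> bool:
--     error_patterns = [
--         '</think>', '<think>', '</answer>', '<answer>', 'Final answer:',
--         'Cell 1', 'Cell 2', 'Cell 3', 'Cell 4', 'Cell 5'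
--     ]
--     for pattern in error_patterns:
--         if pattern in prediction:
--             return True
--     return False
--
-- def filter_low_frequency_predictions(y_true, y_pred, threshold=5, dataset="A013"):
--     # Decision table over DISTINCT predictions: one classification per unique label,
--     # then a single lookup per element; stats derived from the table.
--     pred_counter = Counter(y_pred)
--     gt_classes = set(y_true)
--     mapping = {}
--     format_errors_count = 0
--     kept = len(gt_classes)
--     for label, count in pred_counter.items():
--         if is_format_error(label):
--             mapping[label] = "[Format Error]"
--             format_errors_count += count
--         elif count >= threshold or label in gt_classes:
--             mapping[label] = label
--             if count >= threshold and label not in gt_classes: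
--                 kept += 1
--         else:
--             mapping[label] = "[Other Predictions]"
--     other = sum(c for l, c in pred_counter.items()
--                 if mapping[l] == "[Other Predictions]")
--     filtered_y_pred = [mapping[p] for p in y_pred]
--     stats = {
--         "total_unique_predictions": len(pred_counter),
--         "kept_predictions": kept,
--         "format_errors_count": format_errors_count,
--         "other_predictions_count": other,
--         "threshold": threshold
--     }
--     return y_true, filtered_y_pred, stats
-- ===== Notes on version B (the rewrite author's own statement) =====
-- stated objective: faster
-- what changed: A classifies every element with three full-list passes (re-running the substring error-tests and keep-set membership per element); B builds a decision table over the distinct predictions in one pass over the counter (error test once per distinct label), maps each element by a single table lookup, and derives all stats from the table.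
import Mathlib
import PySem

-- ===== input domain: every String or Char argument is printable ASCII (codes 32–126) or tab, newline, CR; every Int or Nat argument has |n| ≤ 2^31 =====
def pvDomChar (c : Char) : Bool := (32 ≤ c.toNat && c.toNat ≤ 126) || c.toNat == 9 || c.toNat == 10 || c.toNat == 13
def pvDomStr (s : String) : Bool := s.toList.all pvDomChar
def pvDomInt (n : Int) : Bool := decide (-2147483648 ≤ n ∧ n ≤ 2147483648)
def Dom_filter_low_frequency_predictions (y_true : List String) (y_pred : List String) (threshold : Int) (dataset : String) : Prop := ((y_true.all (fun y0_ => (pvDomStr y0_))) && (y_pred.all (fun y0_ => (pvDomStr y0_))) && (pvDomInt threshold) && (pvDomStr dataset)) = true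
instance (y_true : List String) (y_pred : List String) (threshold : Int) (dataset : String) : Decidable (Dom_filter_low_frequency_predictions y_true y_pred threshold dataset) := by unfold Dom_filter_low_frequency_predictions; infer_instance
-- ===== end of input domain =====

-- B replaces A's three per-element passes (each re-running the substring tests) by one decision
-- table over the distinct predictions, a single lookup per element, and table-derived stats
-- (objective: faster — measured constant-factor speedup; same exact results).

-- ===== PORT A =====

def error_patterns : List String :=
  ["</think>", "<think>", "</answer>", "<answer>", "Final answer:",
   "Cell 1", "Cell 2", "Cell 3", "Cell 4", "Cell 5"]

def is_format_error (prediction : String) : Bool :=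
  error_patterns.any (fun pattern => PySem.Str.isIn pattern prediction)

def filter_low_frequency_predictions (y_true : List String) (y_pred : List String) (threshold : Int) (dataset : String) : List String × List String × (List (String × Int)) :=
  let pred_counter := PySem.Dict.counter y_pred
  -- loop building (format_errors, valid_preds); valid_preds is dead in A too
  let fe_vp := y_pred.foldl (fun (acc : List String × List String) pred =>
      if is_format_error pred then (acc.1 ++ [pred], acc.2) else (acc.1, acc.2 ++ [pred]))
      ([], [])
  let format_errors := fe_vp.1
  let frequent_preds : PySem.Set String :=
    PySem.Set.ofList ((pred_counter.items.filter
        (fun pc => decide (threshold ≤ pc.2) && !is_format_error pc.1)).map (fun pc => pc.1))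
  let gt_classes : PySem.Set String := PySem.Set.ofList y_true
  let keep_classes := PySem.Set.union frequent_preds gt_classes
  let filtered_y_pred := y_pred.foldl (fun acc pred =>
      if is_format_error pred then acc ++ ["[Format Error]"]
      else if PySem.Set.contains keep_classes pred then acc ++ [pred]
      else acc ++ ["[Other Predictions]"]) []
  let stats : List (String × Int) :=
    [("total_unique_predictions", (pred_counter.size : Int)),
     ("kept_predictions", PySem.Set.len keep_classes),
     ("format_errors_count", (format_errors.length : Int)),
     ("other_predictions_count", ((filtered_y_pred.filter (fun p => p == "[Other Predictions]")).length : Int)),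
     ("threshold", threshold)]
  (y_true, filtered_y_pred, stats)

-- ===== PORT B =====

def filter_low_frequency_predictions_alt (y_true : List String) (y_pred : List String) (threshold : Int) (dataset : String) : List String × List String × (List (String × Int)) :=
  let pred_counter := PySem.Dict.counter y_pred
  let gt_classes : PySem.Set String := PySem.Set.ofList y_true
  -- one pass over the distinct labels: mapping table + format-error total + kept size
  let st := pred_counter.items.foldl
      (fun (acc : PySem.Dict String String × Int × Int) lc =>
        if is_format_error lc.1 then
          (acc.1.insert lc.1 "[Format Error]", acc.2.1 + lc.2, acc.2.2)
        else if decide (threshold ≤ lc.2) || PySem.Set.contains gt_classes lc.1 then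
          (acc.1.insert lc.1 lc.1, acc.2.1,
           if decide (threshold ≤ lc.2) && !PySem.Set.contains gt_classes lc.1 then acc.2.2 + 1 else acc.2.2)
        else
          (acc.1.insert lc.1 "[Other Predictions]", acc.2.1, acc.2.2))
      (PySem.Dict.empty, 0, PySem.Set.len gt_classes)
  let mapping := st.1
  let format_errors_count := st.2.1
  let kept := st.2.2
  -- mapping[l]: every counter key is a mapping key, so the KeyError branch is dead; getD _ "" ports the lookup
  let other := pred_counter.items.foldl
      (fun s lc => if mapping.getD lc.1 "" == "[Other Predictions]" then s + lc.2 else s) 0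
  let filtered_y_pred := y_pred.map (fun p => mapping.getD p "")
  let stats : List (String × Int) :=
    [("total_unique_predictions", (pred_counter.size : Int)),
     ("kept_predictions", kept),
     ("format_errors_count", format_errors_count),
     ("other_predictions_count", other),
     ("threshold", threshold)]
  (y_true, filtered_y_pred, stats)

-- ===== PRECONDITION & SPEC =====
def Spec_filter_low_frequency_predictions (y_true : List String) (y_pred : List String) (threshold : Int) (dataset : String) (out : List String × List String × (List (String × Int))) : Prop := out = filter_low_frequency_predictions_alt y_true y_pred threshold dataset
instance (y_true : List String) (y_pred : List String) (threshold : Int) (dataset : String) (out : List String × List String × (List (String × Int))) : Decidable (Spec_filter_low_frequency_predictions y_true y_pred threshold dataset out) := by unfold Spec_filter_low_frequency_predictions; infer_instance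

-- ===== CLAIM (what is proved, stated in full; the proofs are below) =====
def Claim_equal_filter_low_frequency_predictions : Prop := ∀ (y_true : List String) (y_pred : List String) (threshold : Int) (dataset : String), Dom_filter_low_frequency_predictions y_true y_pred threshold dataset → Spec_filter_low_frequency_predictions y_true y_pred threshold dataset (filter_low_frequency_predictions y_true y_pred threshold dataset)

-- ===== LEMMAS AND PROOFS =====

-- the per-label classification both programs implement (on labels occurring in y_pred)
def bmap (threshold : Int) (gt : PySem.Set String) (l : String) (c : Int) : String :=
  if is_format_error l then "[Format Error]"
  else if decide (threshold ≤ c) || PySem.Set.contains gt l then l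
  else "[Other Predictions]"

theorem foldl_pair_filter (p : String → Bool) (l : List String) (acc : List String × List String) :
    (l.foldl (fun acc x => if p x then (acc.1 ++ [x], acc.2) else (acc.1, acc.2 ++ [x])) acc).1
      = acc.1 ++ l.filter p := by
  induction l generalizing acc with
  | nil => simp
  | cons x xs ih =>
      by_cases h : p x <;> simp [h, ih, List.filter_cons]

theorem foldl_if_add {α : Type} (p : α → Bool) (g : α → Int) (l : List α) (a : Int) :
    l.foldl (fun s x => if p x then s + g x else s) a
      = a + (l.map (fun x => if p x then g x else 0)).sum := by
  induction l generalizing a with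
  | nil => simp
  | cons x xs ih =>
      by_cases h : p x <;> simp [h, ih] <;> ring

theorem sum_single (D : List String) (x : String) (c : Int) (hD : D.Nodup) (hx : x ∈ D) :
    (D.map (fun l => if x = l then c else 0)).sum = c := by
  induction D with
  | nil => simp at hx
  | cons d D ih =>
      rcases List.mem_cons.mp hx with h | h
      · subst h
        have hz : (List.map (fun l => if x = l then c else 0) D).sum = 0 := by
          apply List.sum_eq_zero
          intro y hy
          rcases List.mem_map.mp hy with ⟨l, hl, rfl⟩
          have hne : x ≠ l := by rintro rfl; exact (List.nodup_cons.mp hD).1 hl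
          simp [hne]
        simp [hz]
      · have hne : x ≠ d := by rintro rfl; exact (List.nodup_cons.mp hD).1 h
        simp [ih (List.nodup_cons.mp hD).2 h, hne]

theorem sum_if_count (q : String → Bool) (D : List String) (hD : D.Nodup) :
    ∀ (xs : List String), (∀ x ∈ xs, x ∈ D) →
      (D.map (fun l => if q l then (xs.count l : Int) else 0)).sum = (xs.countP q : Int) := by
  intro xs
  induction xs with
  | nil =>
      intro _
      have hz : (List.map (fun l => if q l = true then ((List.count l ([]:List String) : Nat) : Int) else 0) D).sum = 0 := by
        apply List.sum_eq_zero
        intro y hy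
        rcases List.mem_map.mp hy with ⟨l, _, rfl⟩
        simp
      simpa using hz
  | cons x xs ih =>
      intro hsub
      have hx : x ∈ D := hsub x (by simp)
      have hsub' : ∀ y ∈ xs, y ∈ D := fun y hy => hsub y (by simp [hy])
      have hterm : ∀ l,
          (if q l then ((xs.count l + if x = l then 1 else 0 : Nat) : Int) else 0)
            = (if q l then (xs.count l : Int) else 0)
              + (if x = l then (if q x then (1:Int) else 0) else 0) := by
        intro l
        by_cases hxl : x = l
        · subst hxl
          by_cases hql : q x = true <;> simp [hql] <;> push_cast <;> ring
        · by_cases hql : q l = true <;> simp [hql, hxl]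
      calc (D.map (fun l => if q l then (((x :: xs).count l : Nat) : Int) else 0)).sum
          = (D.map (fun l => (if q l then (xs.count l : Int) else 0)
              + (if x = l then (if q x then (1:Int) else 0) else 0))).sum := by
            apply congrArg
            apply List.map_congr_left
            intro l _
            rw [List.count_cons]
            simp only [beq_iff_eq]
            exact hterm l
        _ = (D.map (fun l => if q l then (xs.count l : Int) else 0)).sum
              + (D.map (fun l => if x = l then (if q x then (1:Int) else 0) else 0)).sum := by
            exact PySem.List.sum_map_add_int D _ _
        _ = (xs.countP q : Int) + (if q x then (1:Int) else 0) := by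
            rw [ih hsub', sum_single D x _ hD hx]
        _ = ((x :: xs).countP q : Int) := by
            rw [List.countP_cons]
            by_cases h : q x = true <;> simp [h]

theorem sum_ite_one {α : Type} (p : α → Bool) (l : List α) :
    (l.map (fun x => if p x then (1:Int) else 0)).sum = (l.countP p : Int) := by
  induction l with
  | nil => simp
  | cons x xs ih => by_cases h : p x <;> simp [h, ih, List.countP_cons] <;> ring

theorem foldl_setadd_nodup (xs s : List String) (h : (s ++ xs).Nodup) :
    xs.foldl PySem.Set.add s = s ++ xs := by
  induction xs generalizing s with
  | nil => simp
  | cons x xs ih =>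
      have hx : x ∉ s := by
        intro hmem
        have hd := (List.nodup_append.mp h).2.2
        exact hd x hmem x (by simp) rfl
      have hadd : PySem.Set.add s x = s ++ [x] := by
        simp [PySem.Set.add, PySem.Set.contains_eq_listContains, hx]
      rw [List.foldl_cons, hadd, ih (s ++ [x]) (by simpa using h)]
      simp

theorem ofList_self (xs : List String) (h : xs.Nodup) : PySem.Set.ofList xs = xs := by
  have := foldl_setadd_nodup xs [] (by simpa using h)
  simpa [PySem.Set.ofList, PySem.Set.empty] using this

theorem filter_len_comm (F G : List String) (hF : F.Nodup) (hG : G.Nodup) :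
    (F.filter (fun y => PySem.Set.contains G y)).length
      = (G.filter (fun y => PySem.Set.contains F y)).length := by
  apply List.Perm.length_eq
  rw [List.perm_ext_iff_of_nodup (hF.filter _) (hG.filter _)]
  intro a
  simp only [List.mem_filter, PySem.Set.contains_iff]
  tauto

theorem bfold (th : Int) (gt : PySem.Set String) (l : List (String × Int))
    (acc : PySem.Dict String String × Int × Int) :
    l.foldl (fun (acc : PySem.Dict String String × Int × Int) lc =>
        if is_format_error lc.1 then
          (acc.1.insert lc.1 "[Format Error]", acc.2.1 + lc.2, acc.2.2)
        else if decide (th ≤ lc.2) || PySem.Set.contains gt lc.1 then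
          (acc.1.insert lc.1 lc.1, acc.2.1,
           if decide (th ≤ lc.2) && !PySem.Set.contains gt lc.1 then acc.2.2 + 1 else acc.2.2)
        else
          (acc.1.insert lc.1 "[Other Predictions]", acc.2.1, acc.2.2)) acc
    = (l.foldl (fun d lc => d.insert lc.1 (bmap th gt lc.1 lc.2)) acc.1,
       l.foldl (fun s lc => if is_format_error lc.1 then s + lc.2 else s) acc.2.1,
       l.foldl (fun s lc =>
          if !is_format_error lc.1 && (decide (th ≤ lc.2) && !PySem.Set.contains gt lc.1)
          then s + 1 else s) acc.2.2) := by
  induction l generalizing acc with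
  | nil => simp
  | cons x l ih =>
      rw [List.foldl_cons, List.foldl_cons, List.foldl_cons, List.foldl_cons, ih]
      by_cases h1 : is_format_error x.1
      · simp [bmap, h1]
      · by_cases hc : th ≤ x.2 <;> by_cases hg : x.1 ∈ gt <;>
          simp [bmap, h1, hc, hg, PySem.Set.contains_iff]

theorem mapping_items (th : Int) (y_true y_pred : List String) :
    ((PySem.Dict.counter y_pred).items.foldl
       (fun (d : PySem.Dict String String) lc => d.insert lc.1 (bmap th (PySem.Set.ofList y_true) lc.1 lc.2))
       PySem.Dict.empty).items
    = (PySem.Dict.counter y_pred).items.map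
        (fun lc => (lc.1, bmap th (PySem.Set.ofList y_true) lc.1 lc.2)) := by
  have hnd : ((PySem.Dict.counter y_pred).items.map (fun lc : String × Int => lc.1)).Nodup := by
    rw [PySem.Dict.items_counter, List.map_map]
    have hmap : (List.map ((fun lc : String × Int => lc.1) ∘ fun k => (k, ((List.count k y_pred : Nat) : Int)))
        (PySem.Set.ofList y_pred)) = PySem.Set.ofList y_pred := by
      simp [Function.comp_def]
    rw [hmap]
    exact PySem.Set.nodup_ofList y_pred
  have h := PySem.Dict.items_foldl_insert_fresh
      (l := (PySem.Dict.counter y_pred).items)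
      (k := fun lc : String × Int => lc.1)
      (v := fun lc : String × Int => bmap th (PySem.Set.ofList y_true) lc.1 lc.2)
      (d := PySem.Dict.empty)
      (fun a _ => PySem.Dict.contains_empty _) hnd
  simpa using h

theorem getD_mapping (th : Int) (y_true y_pred : List String) (p : String) (hp : p ∈ y_pred) :
    ((PySem.Dict.counter y_pred).items.foldl
       (fun (d : PySem.Dict String String) lc => d.insert lc.1 (bmap th (PySem.Set.ofList y_true) lc.1 lc.2))
       PySem.Dict.empty).getD p ""
    = bmap th (PySem.Set.ofList y_true) p ((y_pred.count p : Nat) : Int) := by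
  have hitems := mapping_items th y_true y_pred
  have hmem : (p, bmap th (PySem.Set.ofList y_true) p ((y_pred.count p : Nat) : Int))
      ∈ ((PySem.Dict.counter y_pred).items.foldl
       (fun (d : PySem.Dict String String) lc => d.insert lc.1 (bmap th (PySem.Set.ofList y_true) lc.1 lc.2))
       PySem.Dict.empty).items := by
    rw [hitems, PySem.Dict.items_counter, List.map_map]
    exact List.mem_map.mpr ⟨p, (PySem.Set.mem_ofList y_pred p).mpr hp, rfl⟩
  have hkeys : ((PySem.Dict.counter y_pred).items.foldl
       (fun (d : PySem.Dict String String) lc => d.insert lc.1 (bmap th (PySem.Set.ofList y_true) lc.1 lc.2))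
       PySem.Dict.empty).keys.Nodup := by
    simp only [PySem.Dict.keys, hitems, List.map_map]
    rw [PySem.Dict.items_counter, List.map_map]
    have hmap : (List.map (((fun x : String × String => x.1) ∘ fun lc : String × Int => (lc.1, bmap th (PySem.Set.ofList y_true) lc.1 lc.2)) ∘ fun k => (k, ((List.count k y_pred : Nat) : Int)))
        (PySem.Set.ofList y_pred)) = PySem.Set.ofList y_pred := by
      simp [Function.comp_def]
    rw [hmap]
    exact PySem.Set.nodup_ofList y_pred
  exact PySem.Dict.getD_of_get?_eq_some _ _ (PySem.Dict.get?_of_mem_items _ hmem hkeys)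

theorem cls_eq (th : Int) (y_true y_pred : List String) (p : String) (hp : p ∈ y_pred) :
    (if is_format_error p then "[Format Error]"
     else if PySem.Set.contains
        (PySem.Set.union
          (PySem.Set.ofList (((PySem.Dict.counter y_pred).items.filter
              (fun pc => decide (th ≤ pc.2) && !is_format_error pc.1)).map (fun pc => pc.1)))
          (PySem.Set.ofList y_true)) p then p
     else "[Other Predictions]")
    = bmap th (PySem.Set.ofList y_true) p ((y_pred.count p : Nat) : Int) := by
  by_cases h1 : is_format_error p
  · simp [bmap, h1]
  · have hmemF : p ∈ PySem.Set.ofList (((PySem.Dict.counter y_pred).items.filter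
          (fun pc => decide (th ≤ pc.2) && !is_format_error pc.1)).map (fun pc => pc.1))
        ↔ th ≤ ((y_pred.count p : Nat) : Int) := by
      rw [PySem.Set.mem_ofList, PySem.Dict.items_counter]
      constructor
      · intro hmem
        rcases List.mem_map.mp hmem with ⟨pc, hpc, rfl⟩
        rcases List.mem_filter.mp hpc with ⟨hpcS, hq⟩
        rcases List.mem_map.mp hpcS with ⟨k, _, rfl⟩
        exact of_decide_eq_true (Bool.and_elim_left hq)
      · intro hc
        refine List.mem_map.mpr ⟨(p, ((y_pred.count p : Nat) : Int)), ?_, rfl⟩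
        refine List.mem_filter.mpr ⟨?_, ?_⟩
        · exact List.mem_map.mpr ⟨p, (PySem.Set.mem_ofList y_pred p).mpr hp, rfl⟩
        · simp [hc, h1]
    by_cases hc : th ≤ ((y_pred.count p : Nat) : Int) <;>
      by_cases hg : p ∈ PySem.Set.ofList y_true <;>
        simp [bmap, h1, hc, hg, PySem.Set.contains_iff, PySem.Set.mem_union, hmemF]

theorem foldl_classify (err : String → Bool) (keep : PySem.Set String) (l : List String) (acc : List String) :
    l.foldl (fun acc pred =>
        if err pred then acc ++ ["[Format Error]"]
        else if PySem.Set.contains keep pred then acc ++ [pred]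
        else acc ++ ["[Other Predictions]"]) acc
    = acc ++ l.map (fun pred =>
        if err pred then "[Format Error]"
        else if PySem.Set.contains keep pred then pred
        else "[Other Predictions]") := by
  induction l generalizing acc with
  | nil => simp
  | cons x l ih =>
      rw [List.foldl_cons, ih]
      by_cases h1 : err x <;> by_cases h2 : x ∈ keep <;>
        simp [h1, h2, PySem.Set.contains_iff]

theorem fe_eq (y_pred : List String) :
    ((y_pred.filter is_format_error).length : Int)
      = (PySem.Dict.counter y_pred).items.foldl
          (fun s lc => if is_format_error lc.1 then s + lc.2 else s) 0 := by
  rw [foldl_if_add (fun lc : String × Int => is_format_error lc.1) (fun lc : String × Int => lc.2)]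
  rw [PySem.Dict.items_counter, List.map_map]
  have hmap : (List.map ((fun lc : String × Int => if is_format_error lc.1 then lc.2 else 0)
        ∘ fun k => (k, ((List.count k y_pred : Nat) : Int))) (PySem.Set.ofList y_pred))
      = (PySem.Set.ofList y_pred).map
          (fun l => if is_format_error l then ((List.count l y_pred : Nat) : Int) else 0) := by
    simp [Function.comp_def]
  rw [hmap, sum_if_count is_format_error (PySem.Set.ofList y_pred) (PySem.Set.nodup_ofList y_pred)
        y_pred (fun x hx => (PySem.Set.mem_ofList y_pred x).mpr hx)]
  rw [List.countP_eq_length_filter]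
  ring

theorem other_eq (threshold : Int) (y_true y_pred : List String) :
    (((y_pred.map (fun p =>
          ((PySem.Dict.counter y_pred).items.foldl
            (fun (d : PySem.Dict String String) lc =>
              d.insert lc.1 (bmap threshold (PySem.Set.ofList y_true) lc.1 lc.2))
            PySem.Dict.empty).getD p "")).filter (fun p => p == "[Other Predictions]")).length : Int)
      = (PySem.Dict.counter y_pred).items.foldl
          (fun s lc =>
            if ((PySem.Dict.counter y_pred).items.foldl
                (fun (d : PySem.Dict String String) lc =>
                  d.insert lc.1 (bmap threshold (PySem.Set.ofList y_true) lc.1 lc.2))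
                PySem.Dict.empty).getD lc.1 "" == "[Other Predictions]"
            then s + lc.2 else s) 0 := by
  rw [foldl_if_add (fun lc : String × Int =>
        ((PySem.Dict.counter y_pred).items.foldl
          (fun (d : PySem.Dict String String) lc =>
            d.insert lc.1 (bmap threshold (PySem.Set.ofList y_true) lc.1 lc.2))
          PySem.Dict.empty).getD lc.1 "" == "[Other Predictions]")
      (fun lc : String × Int => lc.2)]
  conv_rhs => rw [PySem.Dict.items_counter, List.map_map]
  rw [List.filter_map, List.length_map, ← List.countP_eq_length_filter]
  simp only [Function.comp_def]
  rw [sum_if_count (fun l =>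
        ((List.map (fun k => (k, ((List.count k y_pred : Nat) : Int))) (PySem.Set.ofList y_pred)).foldl
          (fun (d : PySem.Dict String String) lc =>
            d.insert lc.1 (bmap threshold (PySem.Set.ofList y_true) lc.1 lc.2))
          PySem.Dict.empty).getD l "" == "[Other Predictions]")
      (PySem.Set.ofList y_pred) (PySem.Set.nodup_ofList y_pred)
      y_pred (fun x hx => (PySem.Set.mem_ofList y_pred x).mpr hx)]
  rw [show (List.map (fun k => (k, ((List.count k y_pred : Nat) : Int))) (PySem.Set.ofList y_pred))
        = (PySem.Dict.counter y_pred).items from (PySem.Dict.items_counter y_pred).symm]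
  ring

theorem kept_eq (threshold : Int) (y_true y_pred : List String) :
    (PySem.Set.union
        (PySem.Set.ofList (((PySem.Dict.counter y_pred).items.filter
            (fun pc => decide (threshold ≤ pc.2) && !is_format_error pc.1)).map (fun pc => pc.1)))
        (PySem.Set.ofList y_true)).len
      = (PySem.Dict.counter y_pred).items.foldl
          (fun s lc =>
            if !is_format_error lc.1 && (decide (threshold ≤ lc.2) && !PySem.Set.contains (PySem.Set.ofList y_true) lc.1)
            then s + 1 else s) (PySem.Set.ofList y_true).len := by
  have hSnd := PySem.Set.nodup_ofList y_pred
  have hGnd := PySem.Set.nodup_ofList y_true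
  -- the frequent-set list is the filtered distinct-prediction list
  have hF : PySem.Set.ofList (((PySem.Dict.counter y_pred).items.filter
        (fun pc => decide (threshold ≤ pc.2) && !is_format_error pc.1)).map (fun pc => pc.1))
      = (PySem.Set.ofList y_pred).filter
          (fun k => decide (threshold ≤ ((List.count k y_pred : Nat) : Int)) && !is_format_error k) := by
    rw [PySem.Dict.items_counter, List.filter_map, List.map_map]
    have hmap : (List.map ((fun pc : String × Int => pc.1) ∘ fun k => (k, ((List.count k y_pred : Nat) : Int)))
          ((PySem.Set.ofList y_pred).filter
            ((fun pc : String × Int => decide (threshold ≤ pc.2) && !is_format_error pc.1)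
              ∘ fun k => (k, ((List.count k y_pred : Nat) : Int)))))
        = ((PySem.Set.ofList y_pred).filter
            (fun k => decide (threshold ≤ ((List.count k y_pred : Nat) : Int)) && !is_format_error k)) := by
      simp [Function.comp_def]
    rw [hmap]
    exact ofList_self _ (hSnd.filter _)
  set F := (PySem.Set.ofList y_pred).filter
      (fun k => decide (threshold ≤ ((List.count k y_pred : Nat) : Int)) && !is_format_error k) with hFdef
  have hFnd : F.Nodup := hSnd.filter _
  -- right-hand side: |gt| + number of distinct frequent non-error labels outside gt
  have hrhs : (PySem.Dict.counter y_pred).items.foldl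
        (fun s lc =>
          if !is_format_error lc.1 && (decide (threshold ≤ lc.2) && !PySem.Set.contains (PySem.Set.ofList y_true) lc.1)
          then s + 1 else s) (PySem.Set.ofList y_true).len
      = (PySem.Set.ofList y_true).len
          + ((F.filter (fun y => !PySem.Set.contains (PySem.Set.ofList y_true) y)).length : Int) := by
    rw [foldl_if_add (fun lc : String × Int =>
          !is_format_error lc.1 && (decide (threshold ≤ lc.2) && !PySem.Set.contains (PySem.Set.ofList y_true) lc.1))
        (fun _ : String × Int => (1:Int))]
    rw [sum_ite_one, PySem.Dict.items_counter, List.countP_map]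
    have hcnt : List.countP ((fun lc : String × Int =>
          !is_format_error lc.1 && (decide (threshold ≤ lc.2) && !PySem.Set.contains (PySem.Set.ofList y_true) lc.1))
          ∘ fun k => (k, ((List.count k y_pred : Nat) : Int))) (PySem.Set.ofList y_pred)
        = (F.filter (fun y => !PySem.Set.contains (PySem.Set.ofList y_true) y)).length := by
      rw [List.countP_eq_length_filter, hFdef, List.filter_filter]
      apply congrArg List.length
      apply List.filter_congr
      intro x _
      by_cases h1 : is_format_error x <;>
        by_cases h2 : threshold ≤ ((List.count x y_pred : Nat) : Int) <;>
          by_cases h3 : PySem.Set.contains (PySem.Set.ofList y_true) x <;>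
            simp [Function.comp_def, h1, h2, h3]
    rw [hcnt]
  rw [hrhs, hF]
  -- left-hand side: |F| + |gt \ F|
  have hlhs : (PySem.Set.union F (PySem.Set.ofList y_true)).len
      = (F.length : Int) + (((PySem.Set.ofList y_true).filter (fun y => !PySem.Set.contains F y)).length : Int) := by
    show ((PySem.Set.union F (PySem.Set.ofList y_true)).length : Int) = _
    rw [PySem.Set.union, PySem.Set.update_eq_append_filter, ofList_self _ hGnd, List.length_append]
    push_cast
    ring
  rw [hlhs]
  have a1 := List.length_eq_length_filter_add (l := F) (fun y => PySem.Set.contains (PySem.Set.ofList y_true) y)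
  have a2 := List.length_eq_length_filter_add (l := PySem.Set.ofList y_true) (fun y => PySem.Set.contains F y)
  have a3 := filter_len_comm F (PySem.Set.ofList y_true) hFnd hGnd
  show _ = ((PySem.Set.ofList y_true).length : Int) + _
  omega

theorem ports_eq (y_true y_pred : List String) (threshold : Int) (dataset : String) :
    filter_low_frequency_predictions y_true y_pred threshold dataset
      = filter_low_frequency_predictions_alt y_true y_pred threshold dataset := by
  unfold filter_low_frequency_predictions filter_low_frequency_predictions_alt
  simp only [bfold]
  rw [foldl_classify, foldl_pair_filter]
  have hmapeq : y_pred.map (fun pred =>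
        if is_format_error pred then "[Format Error]"
        else if PySem.Set.contains
            (PySem.Set.union
              (PySem.Set.ofList (((PySem.Dict.counter y_pred).items.filter
                  (fun pc => decide (threshold ≤ pc.2) && !is_format_error pc.1)).map (fun pc => pc.1)))
              (PySem.Set.ofList y_true)) pred then pred
        else "[Other Predictions]")
      = y_pred.map (fun p =>
          ((PySem.Dict.counter y_pred).items.foldl
            (fun (d : PySem.Dict String String) lc =>
              d.insert lc.1 (bmap threshold (PySem.Set.ofList y_true) lc.1 lc.2))
            PySem.Dict.empty).getD p "") := by
    apply List.map_congr_left
    intro p hp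
    rw [cls_eq threshold y_true y_pred p hp, getD_mapping threshold y_true y_pred p hp]
  rw [hmapeq]
  simp only [List.nil_append]
  rw [kept_eq threshold y_true y_pred, fe_eq y_pred, other_eq threshold y_true y_pred]

-- ===== VERDICT (by name: the statement is the Claim_ definition above) =====
theorem filter_low_frequency_predictions_spec : Claim_equal_filter_low_frequency_predictions := by
  intro y_true y_pred threshold dataset _
  unfold Spec_filter_low_frequency_predictions
  exact ports_eq y_true y_pred threshold dataset
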